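-- pv_equiv track=rewrite | github.com/geodimitrov/Softuniada | 24-25_March_2018/02. easter_egg.py | create_egg
-- ===== SOURCE A (Python) =====
-- HAPPY_EASTER = "HAPPY EASTER"
--
-- def calc_num_tildes(n, egg_width):
--     asterisks = 4
--     dots = n
--     length_without_tilde = asterisks + dots + len(HAPPY_EASTER)
--     num_tildes = egg_width - length_without_tilde
--
--     return num_tildes // 2
--
-- def create_middle_line(n, width, dots):
--     num_tildes = calc_num_tildes(n, width)
--     first_half = dots + 2 * "*" + num_tildes * "~"
--     result = first_half + HAPPY_EASTER + first_half[::-1]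
--
--     return result
--
-- def create_egg(n, egg_width, egg_height):
--     result = ""
--     dots = n // 2 * "."
--     middle_line = create_middle_line(n, egg_width, dots)
--     result += middle_line
--
--     for i in range(n + 1):
--
--         if i < n // 2:
--             asteriks = 2 * "*"
--             eq_signs = (egg_width // 2 - (len(dots) + len(asteriks))) * "="
--             first_half = dots + asteriks + eq_signs
--             line = first_half + first_half[::-1]
--             dots += "."
--
--         elif i < n:
--             asteriks = (n - i) * "*"
--             plus_signs = (egg_width // 2 - (len(dots) + len(asteriks))) * "+"
--             first_half = dots + asteriks + plus_signs
--             line = first_half + first_half[::-1]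
--             dots += 2 * "."
--
--         else:
--             asteriks = n * "*"
--             line = dots + asteriks + dots
--
--
--         result = line + "\n" + result + "\n" + line
--
--     return result
-- ===== SOURCE B (Python) =====
-- HAPPY_EASTER = "HAPPY EASTER"
--
-- def create_egg(n, egg_width, egg_height):
--     half = n // 2
--
--     def row(i):
--         # dots-prefix length of row i in closed form: start at n//2,
--         # +1 per row while i < n//2, then +2 per row while i < n
--         d = "." * (half + min(i, half) + 2 * max(0, i - half))
--         if i < half:
--             body = d + "**" + "=" * (egg_width // 2 - len(d) - 2)
--             return body + body[::-1]
--         if i < n: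
--             body = d + "*" * (n - i) + "+" * (egg_width // 2 - len(d) - (n - i))
--             return body + body[::-1]
--         return d + "*" * n + d
--
--     tildes = (egg_width - (4 + n + len(HAPPY_EASTER))) // 2
--     half_mid = "." * half + "**" + "~" * tildes
--     middle = half_mid + HAPPY_EASTER + half_mid[::-1]
--     rows = [row(i) for i in range(n + 1)]
--     return "\n".join(rows[::-1] + [middle] + rows)
-- ===== Notes on version B (the rewrite author's own statement) =====
-- stated objective: simpler
-- what changed: B replaces A's mutable center-out accumulator (growing `dots` state and wrapping result = line + '\n' + result + '\n' + line, which recopies the whole result every iteration) with a direct indexed pass: each row's dots-prefix length is computed in closed form from its index, the rows are collected in a list, and the egg is '\n'.join(reversed(rows) + [middle] + rows).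
import Mathlib
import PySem

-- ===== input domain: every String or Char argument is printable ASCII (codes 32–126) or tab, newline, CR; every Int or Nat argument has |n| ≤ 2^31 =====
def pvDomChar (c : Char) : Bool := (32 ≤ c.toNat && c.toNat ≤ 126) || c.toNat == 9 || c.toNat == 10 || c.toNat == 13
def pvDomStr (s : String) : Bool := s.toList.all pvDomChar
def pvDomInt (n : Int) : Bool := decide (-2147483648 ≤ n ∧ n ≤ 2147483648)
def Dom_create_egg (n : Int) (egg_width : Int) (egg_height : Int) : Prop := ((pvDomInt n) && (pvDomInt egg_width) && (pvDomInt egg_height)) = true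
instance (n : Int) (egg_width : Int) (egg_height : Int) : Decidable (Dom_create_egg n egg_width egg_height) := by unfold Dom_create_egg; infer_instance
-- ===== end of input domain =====

-- B replaces A's mutable center-out string accumulator with a direct indexed row
-- pass (closed-form dots-prefix length per row) joined top+middle+bottom; objective: simpler.


-- ===== PORT A =====
def pvHappyEaster : List Char := "HAPPY EASTER".toList

def calc_num_tildes (n : Int) (egg_width : Int) : Int :=
  let asterisks : Int := 4
  let dots : Int := n
  let length_without_tilde := asterisks + dots + (pvHappyEaster.length : Int)
  let num_tildes := egg_width - length_without_tilde
  PySem.Int.floordiv num_tildes 2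

def create_middle_line (n : Int) (width : Int) (dots : List Char) : List Char :=
  let num_tildes := calc_num_tildes n width
  let first_half := dots ++ PySem.List.pyRepeat ['*'] 2 ++ PySem.List.pyRepeat ['~'] num_tildes
  first_half ++ pvHappyEaster ++ first_half.reverse

-- the body of A's for-loop: state = (result, dots)
def eggStep (n : Int) (egg_width : Int) (st : List Char × List Char) (i : Int) :
    List Char × List Char :=
  let result := st.1
  let dots := st.2
  if i < PySem.Int.floordiv n 2 then
    let asteriks := PySem.List.pyRepeat ['*'] 2
    let eq_signs := PySem.List.pyRepeat ['=']
      (PySem.Int.floordiv egg_width 2 - ((dots.length : Int) + (asteriks.length : Int)))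
    let first_half := dots ++ asteriks ++ eq_signs
    let line := first_half ++ first_half.reverse
    (line ++ ['\n'] ++ result ++ ['\n'] ++ line, dots ++ ['.'])
  else if i < n then
    let asteriks := PySem.List.pyRepeat ['*'] (n - i)
    let plus_signs := PySem.List.pyRepeat ['+']
      (PySem.Int.floordiv egg_width 2 - ((dots.length : Int) + (asteriks.length : Int)))
    let first_half := dots ++ asteriks ++ plus_signs
    let line := first_half ++ first_half.reverse
    (line ++ ['\n'] ++ result ++ ['\n'] ++ line, dots ++ ['.', '.'])
  else
    let asteriks := PySem.List.pyRepeat ['*'] n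
    let line := dots ++ asteriks ++ dots
    (line ++ ['\n'] ++ result ++ ['\n'] ++ line, dots)

def create_egg (n : Int) (egg_width : Int) (egg_height : Int) : String :=
  let dots := PySem.List.pyRepeat ['.'] (PySem.Int.floordiv n 2)
  let middle_line := create_middle_line n egg_width dots
  let result := middle_line
  let st := (PySem.List.pyRange 0 (n + 1)).foldl (eggStep n egg_width) (result, dots)
  String.ofList st.1

-- ===== PORT B =====
-- row i of the egg, dots-prefix length in closed form
def eggRow (n : Int) (egg_width : Int) (i : Int) : List Char :=
  let half := PySem.Int.floordiv n 2
  let d := PySem.List.pyRepeat ['.'] (half + min i half + 2 * max 0 (i - half))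
  if i < half then
    let body := d ++ "**".toList ++ PySem.List.pyRepeat ['=']
      (PySem.Int.floordiv egg_width 2 - (d.length : Int) - 2)
    body ++ body.reverse
  else if i < n then
    let body := d ++ PySem.List.pyRepeat ['*'] (n - i) ++ PySem.List.pyRepeat ['+']
      (PySem.Int.floordiv egg_width 2 - (d.length : Int) - (n - i))
    body ++ body.reverse
  else
    d ++ PySem.List.pyRepeat ['*'] n ++ d

def create_egg_alt (n : Int) (egg_width : Int) (egg_height : Int) : String :=
  let half := PySem.Int.floordiv n 2
  let tildes := PySem.Int.floordiv (egg_width - (4 + n + (pvHappyEaster.length : Int))) 2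
  let half_mid := PySem.List.pyRepeat ['.'] half ++ "**".toList ++ PySem.List.pyRepeat ['~'] tildes
  let middle := half_mid ++ pvHappyEaster ++ half_mid.reverse
  let rows := (PySem.List.pyRange 0 (n + 1)).map (eggRow n egg_width)
  String.ofList (PySem.Chars.join ['\n'] (rows.reverse ++ [middle] ++ rows))

-- ===== PRECONDITION & SPEC =====
def Spec_create_egg (n : Int) (egg_width : Int) (egg_height : Int) (out : String) : Prop := out = create_egg_alt n egg_width egg_height
instance (n : Int) (egg_width : Int) (egg_height : Int) (out : String) : Decidable (Spec_create_egg n egg_width egg_height out) := by unfold Spec_create_egg; infer_instance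

-- ===== CLAIM (what is proved, stated in full; the proofs are below) =====
def Claim_equal_create_egg : Prop := ∀ (n : Int) (egg_width : Int) (egg_height : Int), Dom_create_egg n egg_width egg_height → Spec_create_egg n egg_width egg_height (create_egg n egg_width egg_height)

-- ===== LEMMAS AND PROOFS =====

-- length (as Int) of the dots prefix at the start of iteration i, matching eggRow's d
def Lfun (n : Int) (i : Int) : Int :=
  PySem.Int.floordiv n 2 + min i (PySem.Int.floordiv n 2)
    + 2 * max 0 (i - PySem.Int.floordiv n 2)

def rowsUpTo (n : Int) (w : Int) (m : Int) : List (List Char) :=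
  (PySem.List.pyRange 0 m).map (eggRow n w)

def Jfun (n : Int) (w : Int) (mid : List Char) (m : Int) : List Char :=
  PySem.Chars.join ['\n'] ((rowsUpTo n w m).reverse ++ [mid] ++ rowsUpTo n w m)

theorem join_cons_ne (sep r : List Char) (ys : List (List Char)) (h : ys ≠ []) :
    PySem.Chars.join sep (r :: ys) = r ++ sep ++ PySem.Chars.join sep ys := by
  cases ys with
  | nil => exact absurd rfl h
  | cons q rest => exact PySem.Chars.join_cons_cons sep r q rest

theorem join_append_singleton (sep r : List Char) (ys : List (List Char)) (h : ys ≠ []) :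
    PySem.Chars.join sep (ys ++ [r]) = PySem.Chars.join sep ys ++ sep ++ r := by
  induction ys with
  | nil => exact absurd rfl h
  | cons p rest ih =>
    cases rest with
    | nil => simp [PySem.Chars.join_cons_cons, PySem.Chars.join_singleton]
    | cons q rest' =>
      simp only [List.cons_append]
      rw [PySem.Chars.join_cons_cons, PySem.Chars.join_cons_cons,
          ← List.cons_append, ih (by simp)]
      simp

theorem Jfun_succ (n w : Int) (mid : List Char) (m : Int) (hm : 0 ≤ m) :
    Jfun n w mid (m + 1)
      = eggRow n w m ++ ['\n'] ++ Jfun n w mid m ++ ['\n'] ++ eggRow n w m := by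
  have hrows : rowsUpTo n w (m + 1) = rowsUpTo n w m ++ [eggRow n w m] := by
    unfold rowsUpTo
    rw [PySem.List.pyRange_one_succ_right hm, List.map_append]
    simp
  unfold Jfun
  rw [hrows]
  have h1 : (rowsUpTo n w m ++ [eggRow n w m]).reverse
      = eggRow n w m :: (rowsUpTo n w m).reverse := by simp
  rw [h1, List.cons_append, List.cons_append]
  rw [join_cons_ne _ _ _ (by simp)]
  have h2 : (rowsUpTo n w m).reverse ++ [mid] ++ (rowsUpTo n w m ++ [eggRow n w m])
      = ((rowsUpTo n w m).reverse ++ [mid] ++ rowsUpTo n w m) ++ [eggRow n w m] := by simp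
  rw [h2, join_append_singleton _ _ _ (by simp)]
  simp

theorem eggStep_eq (n w : Int) (res : List Char) (i : Int) (h0 : 0 ≤ i) (hi : i ≤ n) :
    eggStep n w (res, PySem.List.pyRepeat ['.'] (Lfun n i)) i
      = (eggRow n w i ++ ['\n'] ++ res ++ ['\n'] ++ eggRow n w i,
         PySem.List.pyRepeat ['.'] (Lfun n (min (i + 1) n))) := by
  have h2 : (0 : Int) < 2 := by norm_num
  have hstar : PySem.List.pyRepeat ['*'] 2 = "**".toList := by decide
  simp only [eggStep, eggRow, Lfun, hstar, PySem.List.pyRepeat_singleton,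
    PySem.Int.floordiv_eq_ediv_of_pos h2, List.length_replicate]
  split_ifs with ha hb
  · -- i < n / 2
    rw [Prod.mk.injEq]
    constructor
    · have hc : (("**".toList.length : Nat) : Int) = 2 := by decide
      rw [hc]
      simp only [sub_sub]
    · have hc : (n / 2 + min (i + 1) (n / 2) + 2 * max 0 (i + 1 - n / 2)).toNat
          = (n / 2 + min i (n / 2) + 2 * max 0 (i - n / 2)).toNat + 1 := by omega
      have hm : min (i + 1) n = i + 1 := by omega
      rw [hm, hc, List.replicate_succ']
  · -- n / 2 ≤ i < n
    rw [Prod.mk.injEq]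
    constructor
    · have hc : (((n - i).toNat : Nat) : Int) = n - i := by omega
      rw [hc]
      simp only [sub_sub]
    · have hm : min (i + 1) n = i + 1 := by omega
      have hc : (n / 2 + min (i + 1) (n / 2) + 2 * max 0 (i + 1 - n / 2)).toNat
          = ((n / 2 + min i (n / 2) + 2 * max 0 (i - n / 2)).toNat + 1) + 1 := by omega
      rw [hm, hc, List.replicate_succ', List.replicate_succ']
      simp
  · -- i = n
    have hm : min (i + 1) n = i := by omega
    have hc : min i (n / 2) = min n (n / 2) := by omega
    rw [hm]

theorem egg_invariant (n w : Int) (mid : List Char) (hn : 0 ≤ n) (k : Nat) (hk : (k : Int) ≤ n + 1) :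
    (PySem.List.pyRange 0 (k : Int)).foldl (eggStep n w) (mid, PySem.List.pyRepeat ['.'] (Lfun n 0))
      = (Jfun n w mid (k : Int), PySem.List.pyRepeat ['.'] (Lfun n (min (k : Int) n))) := by
  induction k with
  | zero =>
    simp only [Nat.cast_zero]
    have h0 : PySem.List.pyRange 0 0 = [] := by decide
    have hm : min (0 : Int) n = 0 := by omega
    rw [h0, hm]
    simp [Jfun, rowsUpTo, h0, PySem.Chars.join_singleton]
  | succ k ih =>
    have hk' : (k : Int) ≤ n := by push_cast at hk ⊢; omega
    have hk'' : (k : Int) ≤ n + 1 := by omega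
    have hfold : PySem.List.pyRange 0 ((k : Int) + 1)
        = PySem.List.pyRange 0 (k : Int) ++ [(k : Int)] := by
      exact PySem.List.pyRange_one_succ_right (by positivity)
    push_cast
    rw [hfold, List.foldl_append, ih hk'']
    have hmk : min (k : Int) n = (k : Int) := by omega
    rw [hmk]
    simp only [List.foldl_cons, List.foldl_nil]
    rw [eggStep_eq n w _ (k : Int) (by positivity) hk']
    rw [Jfun_succ n w mid (k : Int) (by positivity)]

-- ===== VERDICT (by name: the statement is the Claim_ definition above) =====
theorem create_egg_spec : Claim_equal_create_egg := by
  intro n w hgt _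
  simp only [Spec_create_egg]
  have h2 : (0 : Int) < 2 := by norm_num
  have hstar : PySem.List.pyRepeat ['*'] 2 = "**".toList := by decide
  by_cases hn : 0 ≤ n
  · have hL0 : PySem.Int.floordiv n 2 = Lfun n 0 := by
      simp only [Lfun, PySem.Int.floordiv_eq_ediv_of_pos h2]
      omega
    have hcast : ((n.toNat + 1 : Nat) : Int) = n + 1 := by omega
    simp only [create_egg, create_egg_alt, create_middle_line, calc_num_tildes, hstar]
    congr 1
    rw [hL0, ← hcast,
      egg_invariant n w _ hn (n.toNat + 1) (by omega)]
    have hmin : min ((n.toNat + 1 : Nat) : Int) n = n := by omega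
    simp only [Jfun, rowsUpTo, hcast]
  · have hnil : PySem.List.pyRange 0 (n + 1) = [] :=
      PySem.List.pyRange_one_eq_nil (by omega)
    simp only [create_egg, create_egg_alt, create_middle_line, calc_num_tildes, hstar, hnil,
      List.foldl_nil, List.map_nil, List.reverse_nil, List.nil_append, List.append_nil,
      PySem.Chars.join_singleton]
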